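-- pv_equiv track=rewrite | github.com/kushal-10/mapworld-thesis | escaperoom/analysis/loops.py | count_loops
-- ===== SOURCE A (Python) =====
-- MOVE_MAP = {
--     "north": (0, 1),
--     "south": (0, -1),
--     "east": (1, 0),
--     "west": (-1, 0)
-- }
--
-- def count_loops(moves, min_len=2, max_len=4):
--     n = len(moves)
--     found = 0
--     for window in range(min_len, max_len + 1):
--         for i in range(n - window + 1):
--             dx, dy = 0, 0
--             for move in moves[i:i+window]:
--                 mx, my = MOVE_MAP.get(move, (0, 0))
--                 dx += mx
--                 dy += my
--             if dx == 0 and dy == 0: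
--                 found += 1
--     return found
-- ===== SOURCE B (Python) =====
-- MOVE_MAP = {
--     "north": (0, 1),
--     "south": (0, -1),
--     "east": (1, 0),
--     "west": (-1, 0)
-- }
--
-- def count_loops(moves, min_len=2, max_len=4):
--     # Prefix sums of the cumulative displacement: a window moves[i:i+w] is a
--     # loop iff pref[i+w] == pref[i]; no inner rescan of the window.  Window
--     # lengths longer than the walk cannot occur, so the loop stops at n.
--     n = len(moves)
--     pref = [(0, 0)]
--     x = y = 0
--     for m in moves:
--         mx, my = MOVE_MAP.get(m, (0, 0))
--         x += mx
--         y += my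
--         pref.append((x, y))
--     found = 0
--     for window in range(min_len, min(max_len, n) + 1):
--         for i in range(n - window + 1):
--             if pref[i + window] == pref[i]:
--                 found += 1
--     return found
-- ===== Notes on version B (the rewrite author's own statement) =====
-- stated objective: alternative
-- what changed: B precomputes prefix sums of the cumulative (dx,dy) displacement once and tests each window by one prefix comparison instead of rescanning the window, with window lengths clamped to the walk's length.
-- outside the precondition, e.g. on count_loops([], -1, 1): A returns 3, B raises IndexError
import Mathlib
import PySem

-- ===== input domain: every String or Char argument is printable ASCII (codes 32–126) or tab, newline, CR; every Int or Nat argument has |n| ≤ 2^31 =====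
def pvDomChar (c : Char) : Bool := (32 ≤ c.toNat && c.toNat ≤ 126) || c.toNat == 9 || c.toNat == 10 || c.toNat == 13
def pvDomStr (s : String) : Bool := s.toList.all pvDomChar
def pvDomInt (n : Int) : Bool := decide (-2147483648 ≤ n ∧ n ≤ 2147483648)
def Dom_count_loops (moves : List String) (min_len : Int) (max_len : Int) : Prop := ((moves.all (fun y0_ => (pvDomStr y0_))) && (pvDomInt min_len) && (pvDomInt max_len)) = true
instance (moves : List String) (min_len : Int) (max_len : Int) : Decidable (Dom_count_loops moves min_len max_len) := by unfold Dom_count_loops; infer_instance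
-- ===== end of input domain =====

-- B replaces A's per-window rescan by a single prefix-sum pass, testing each window by one prefix comparison (window lengths clamped to the walk's length).


-- ===== PORT A =====
-- MOVE_MAP = {...}
def MOVE_MAP : PySem.Dict String (Int × Int) :=
  PySem.Dict.ofList [("north", (0, 1)), ("south", (0, -1)), ("east", (1, 0)), ("west", (-1, 0))]

-- MOVE_MAP.get(move, (0, 0))
def moveDelta (move : String) : Int × Int := PySem.Dict.getD MOVE_MAP move (0, 0)

def count_loops (moves : List String) (min_len : Int) (max_len : Int) : Int :=
  let n : Int := moves.length
  (PySem.List.pyRange min_len (max_len + 1) 1).foldl (fun found window =>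
    (PySem.List.pyRange 0 (n - window + 1) 1).foldl (fun found i =>
      let d := (PySem.List.slice moves (some i) (some (i + window))).foldl
        (fun (d : Int × Int) move =>
          let m := moveDelta move
          (d.1 + m.1, d.2 + m.2)) (0, 0)
      if d.1 = 0 ∧ d.2 = 0 then found + 1 else found) found) 0

-- ===== PORT B =====
def count_loops_alt (moves : List String) (min_len : Int) (max_len : Int) : Int :=
  let n : Int := moves.length
  let st := moves.foldl (fun (st : List (Int × Int) × Int × Int) m =>
      let mv := moveDelta m
      let x := st.2.1 + mv.1
      let y := st.2.2 + mv.2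
      (st.1 ++ [(x, y)], x, y)) ([(0, 0)], 0, 0)
  let pref := st.1
  (PySem.List.pyRange min_len (min max_len n + 1) 1).foldl (fun found window =>
    (PySem.List.pyRange 0 (n - window + 1) 1).foldl (fun found i =>
      -- pref[i+window] / pref[i]: indices are in range under Pre_, so pyGetD is exact
      if PySem.List.pyGetD pref (i + window) (0, 0) = PySem.List.pyGetD pref i (0, 0)
      then found + 1 else found) found) 0

-- ===== PRECONDITION & SPEC =====
-- Pre_ excludes negative window lengths (min_len < 0), outside the task's natural domain:
-- there A counts every empty slice moves[i:i+window] as a loop while B's prefix indexing raises.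
def Pre_count_loops (moves : List String) (min_len : Int) (max_len : Int) : Prop := 0 ≤ min_len
instance (moves : List String) (min_len : Int) (max_len : Int) : Decidable (Pre_count_loops moves min_len max_len) := by unfold Pre_count_loops; infer_instance

def pvWitness_count_loops : List String × Int × Int := (["north", "south", "east"], 2, 4)

def Spec_count_loops (moves : List String) (min_len : Int) (max_len : Int) (out : Int) : Prop := out = count_loops_alt moves min_len max_len
instance (moves : List String) (min_len : Int) (max_len : Int) (out : Int) : Decidable (Spec_count_loops moves min_len max_len out) := by unfold Spec_count_loops; infer_instance

-- ===== CLAIM (what is proved, stated in full; the proofs are below) =====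
def Claim_equal_count_loops : Prop := ∀ (moves : List String) (min_len : Int) (max_len : Int), Dom_count_loops moves min_len max_len → Pre_count_loops moves min_len max_len → Spec_count_loops moves min_len max_len (count_loops moves min_len max_len)

-- ===== LEMMAS AND PROOFS =====

-- displacement step and total displacement of a list of moves
def dstep (d : Int × Int) (move : String) : Int × Int :=
  let m := moveDelta move
  (d.1 + m.1, d.2 + m.2)

def disp (l : List String) : Int × Int := l.foldl dstep (0, 0)

theorem foldl_dstep (l : List String) (c : Int × Int) :
    l.foldl dstep c = (c.1 + (disp l).1, c.2 + (disp l).2) := by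
  induction l generalizing c with
  | nil => simp [disp]
  | cons m rest ih =>
    simp only [List.foldl_cons, ih (dstep c m), ih (dstep (0,0) m), disp]
    simp [dstep]; constructor <;> ring

theorem disp_append (a b : List String) :
    disp (a ++ b) = ((disp a).1 + (disp b).1, (disp a).2 + (disp b).2) := by
  unfold disp
  rw [List.foldl_append, foldl_dstep]
  rfl

theorem disp_cons (m : String) (l : List String) :
    disp (m :: l) = ((moveDelta m).1 + (disp l).1, (moveDelta m).2 + (disp l).2) := by
  have h := disp_append [m] l
  simp only [List.singleton_append] at h
  rw [h]
  simp [disp, dstep]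

-- the prefix list B builds is the list of displacements of all prefixes
theorem pref_general (ms : List String) (acc : List (Int × Int)) (c : Int × Int) :
    (ms.foldl (fun (st : List (Int × Int) × Int × Int) m =>
      let mv := moveDelta m
      let x := st.2.1 + mv.1
      let y := st.2.2 + mv.2
      (st.1 ++ [(x, y)], x, y)) (acc, c)).1
    = acc ++ (List.range (ms.length + 1)).tail.map
        (fun k => (c.1 + (disp (ms.take k)).1, c.2 + (disp (ms.take k)).2)) := by
  induction ms generalizing acc c with
  | nil => simp
  | cons m rest ih =>
    simp only [List.foldl_cons]
    rw [ih]
    simp only [List.length_cons]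
    have htail : ∀ n : Nat, (List.range (n + 1)).tail = (List.range n).map Nat.succ := by
      intro n; rw [List.range_succ_eq_map]; rfl
    rw [htail, htail, List.map_map, List.range_succ_eq_map, List.map_cons, List.map_map]
    simp only [List.append_assoc, List.singleton_append]
    congr 1
    congr 1
    · simp [disp, dstep]
    · rw [List.map_map]
      apply List.map_congr_left
      intro k _
      simp only [Function.comp, List.take_succ_cons, disp_cons, Prod.mk.injEq]
      constructor <;> ring

theorem pref_eq (ms : List String) :
    (ms.foldl (fun (st : List (Int × Int) × Int × Int) m =>
      let mv := moveDelta m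
      let x := st.2.1 + mv.1
      let y := st.2.2 + mv.2
      (st.1 ++ [(x, y)], x, y)) ([(0, 0)], 0, 0)).1
    = (List.range (ms.length + 1)).map (fun k => disp (ms.take k)) := by
  rw [pref_general]
  have htail : (List.range (ms.length + 1)).tail = (List.range ms.length).map Nat.succ := by
    rw [List.range_succ_eq_map]; rfl
  rw [htail, List.map_map, List.range_succ_eq_map, List.map_cons, List.map_map]
  simp [disp]

theorem loop_iff (ms : List String) (i' w' : Nat) :
    ((disp ((ms.drop i').take w')).1 = 0 ∧ (disp ((ms.drop i').take w')).2 = 0)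
    ↔ disp (ms.take (i' + w')) = disp (ms.take i') := by
  rw [List.take_add, disp_append, Prod.ext_iff]
  constructor
  · rintro ⟨h1, h2⟩; simp [h1, h2]
  · rintro ⟨h1, h2⟩; constructor <;> omega

-- windows longer than the walk contribute nothing to A's count
theorem zero_fold (moves : List String) (l : List Int) (acc : Int)
    (h : ∀ w ∈ l, (moves.length : Int) < w) :
    l.foldl (fun found window =>
      (PySem.List.pyRange 0 ((moves.length : Int) - window + 1) 1).foldl (fun found i =>
        let d := (PySem.List.slice moves (some i) (some (i + window))).foldl
          (fun (d : Int × Int) move =>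
            let m := moveDelta move
            (d.1 + m.1, d.2 + m.2)) (0, 0)
        if d.1 = 0 ∧ d.2 = 0 then found + 1 else found) found) acc = acc := by
  induction l generalizing acc with
  | nil => rfl
  | cons w l ih =>
    simp only [List.foldl_cons]
    rw [PySem.List.pyRange_one_eq_nil (by have := h w (by simp); omega)]
    exact ih acc (fun w hw => h w (by simp [hw]))

-- over any list of nonnegative window lengths, A's scan and B's prefix comparison count alike
theorem fold_eq (moves : List String) (l : List Int) (acc : Int)
    (h : ∀ w ∈ l, 0 ≤ w) :
    l.foldl (fun found window =>
      (PySem.List.pyRange 0 ((moves.length : Int) - window + 1) 1).foldl (fun found i =>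
        let d := (PySem.List.slice moves (some i) (some (i + window))).foldl
          (fun (d : Int × Int) move =>
            let m := moveDelta move
            (d.1 + m.1, d.2 + m.2)) (0, 0)
        if d.1 = 0 ∧ d.2 = 0 then found + 1 else found) found) acc
    = l.foldl (fun found window =>
      (PySem.List.pyRange 0 ((moves.length : Int) - window + 1) 1).foldl (fun found i =>
        if PySem.List.pyGetD ((List.range (moves.length + 1)).map (fun k => disp (moves.take k))) (i + window) (0, 0)
           = PySem.List.pyGetD ((List.range (moves.length + 1)).map (fun k => disp (moves.take k))) i (0, 0)
        then found + 1 else found) found) acc := by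
  apply PySem.List.foldl_congr_mem
  intro found w hw
  have hw0 : (0 : Int) ≤ w := h w hw
  apply PySem.List.foldl_congr_mem
  intro acc i hi
  have hi' := PySem.List.mem_pyRange_one.mp hi
  have hi0 : (0 : Int) ≤ i := hi'.1
  have hiw : i + w ≤ (moves.length : Int) := by omega
  have hlam : (fun (d : Int × Int) move =>
      let m := moveDelta move
      (d.1 + m.1, d.2 + m.2)) = dstep := rfl
  rw [hlam]
  rw [PySem.List.slice_toNat moves hi0 (by omega)]
  have hP1 : PySem.List.pyGetD ((List.range (moves.length + 1)).map (fun k => disp (moves.take k))) (i + w) (0, 0)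
      = disp (moves.take ((i + w).toNat)) := by
    rw [PySem.List.pyGetD_eq_getElem _ _ (by omega) (by simp; omega)]
    simp only [List.getElem_map, List.getElem_range]
  have hP2 : PySem.List.pyGetD ((List.range (moves.length + 1)).map (fun k => disp (moves.take k))) i (0, 0)
      = disp (moves.take i.toNat) := by
    rw [PySem.List.pyGetD_eq_getElem _ _ (by omega) (by simp; omega)]
    simp only [List.getElem_map, List.getElem_range]
  have htn : (i + w).toNat = i.toNat + w.toNat := by omega
  rw [htn] at hP1
  rw [hP1, hP2]
  have htn2 : (i + w).toNat - i.toNat = w.toNat := by omega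
  rw [htn2]
  exact if_congr (loop_iff moves i.toNat w.toNat) rfl rfl

theorem count_loops_spec : Claim_equal_count_loops := by
  intro moves min_len max_len _ hpre
  unfold Pre_count_loops at hpre
  unfold Spec_count_loops count_loops count_loops_alt
  simp only [pref_eq]
  have hmem : ∀ (a b : Int), ∀ w ∈ PySem.List.pyRange a b, a ≤ w :=
    fun a b w hw => (PySem.List.mem_pyRange_one.mp hw).1
  by_cases hc : max_len ≤ (moves.length : Int)
  · rw [min_eq_left hc]
    exact fold_eq moves _ 0 (fun w hw => le_trans hpre (hmem _ _ w hw))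
  · have hc' : (moves.length : Int) ≤ max_len := le_of_not_ge hc
    rw [min_eq_right hc']
    by_cases hm : min_len ≤ (moves.length : Int) + 1
    · rw [PySem.List.pyRange_one_append min_len ((moves.length : Int) + 1) (max_len + 1) hm (by omega),
        List.foldl_append]
      exact Eq.trans
        (zero_fold moves _ _ (fun w hw => by have := hmem _ _ w hw; omega))
        (fold_eq moves _ 0 (fun w hw => le_trans hpre (hmem _ _ w hw)))
    · rw [PySem.List.pyRange_one_eq_nil (show (moves.length : Int) + 1 ≤ min_len from by omega)]
      exact zero_fold moves _ 0 (fun w hw => by have := hmem _ _ w hw; omega)
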